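-- pv_equiv track=rewrite | github.com/aim-tello/algoritmos-combinatorios-tarea-2 | src/algoritmos_combinatorios_tarea_2/ejercicio_13.py | prev_partition
-- ===== SOURCE A (Python) =====
-- from typing import List, Optional
--
-- def prev_partition(lam: List[int]) -> Optional[List[int]]:
--     """
--     Calcula el predecesor lexicográfico de una partición entera lambda.
--
--     :param lam: Lista de enteros decrecientes que representa la partición.
--     :return: Lista con la partición previa, o None si es la partición suprema (n).
--     """
--     k = len(lam)
--
--     # Caso base: La partición suprema (n) carece de predecesor.
--     if k <= 1:
--         return None
--
--     # 1. Determinación del índice crítico (0-indexado)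
--     # Buscamos de derecha a izquierda (sin contar el último elemento k-1)
--     idx = 0
--     for i in range(k - 2, -1, -1):
--         if i == 0 or lam[i] < lam[i - 1]:
--             idx = i
--             break
--
--     # 2. Cálculo de la masa residual a condensar
--     # Suma de todos los elementos a la derecha del índice crítico, menos 1
--     # que será absorbido por lam[idx]
--     tail_sum = sum(lam[idx + 1:]) - 1
--
--     # 3. Ensamblaje de la nueva partición
--     # Se preserva el prefijo estricto
--     mu = lam[:idx]
--     # Se incrementa el elemento en el índice crítico
--     mu.append(lam[idx] + 1)
--     # Se minimiza el sufijo topológico mediante un bloque de 1s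
--     mu.extend([1] * tail_sum)
--
--     return mu
-- ===== SOURCE B (Python) =====
-- from typing import List, Optional
--
-- def prev_partition(lam: List[int]) -> Optional[List[int]]:
--     k = len(lam)
--     if k <= 1:
--         return None
--     # one forward pass: keep the LAST strict-descent position idx (default 0),
--     # the prefix sum 'pref' up to idx, and the running prefix sum 'run'
--     idx = 0
--     pref = run = lam[0]
--     for i in range(1, k - 1):
--         run += lam[i]
--         if lam[i] < lam[i - 1]:
--             idx, pref = i, run
--     t = run + lam[-1] - pref - 1
--     return lam[:idx] + [lam[idx] + 1] + [1] * t
-- ===== Notes on version B (the rewrite author's own statement) =====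
-- stated objective: alternative
-- what changed: A scans backward with a break to find the critical index and then separately sums the slice lam[idx+1:]; B makes one forward pass keeping the last strict-descent index together with running prefix sums, so no second pass and no slicing for the tail mass.
import Mathlib
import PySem

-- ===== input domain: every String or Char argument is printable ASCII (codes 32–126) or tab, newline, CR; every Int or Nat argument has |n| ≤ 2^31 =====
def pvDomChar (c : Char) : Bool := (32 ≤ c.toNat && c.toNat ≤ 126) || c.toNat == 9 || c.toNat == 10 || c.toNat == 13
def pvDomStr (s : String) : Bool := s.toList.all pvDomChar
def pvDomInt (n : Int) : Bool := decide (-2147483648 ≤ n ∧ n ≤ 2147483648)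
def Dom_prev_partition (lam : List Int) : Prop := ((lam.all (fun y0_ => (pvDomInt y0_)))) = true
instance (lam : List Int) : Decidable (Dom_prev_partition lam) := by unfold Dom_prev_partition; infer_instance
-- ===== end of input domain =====

-- B replaces A's backward break-search plus separate slice-sum by ONE forward pass that
-- keeps the last strict-descent index together with running prefix sums (objective: alternative).

-- ===== PORT A =====
-- A's backward 'for i in range(k-2, -1, -1): if i == 0 or lam[i] < lam[i-1]: idx = i; break'
-- (indices produced by the range are always in bounds, so lam[i] is ported with the total pyGetD)
def prevA_find (lam : List Int) : List Int → Int
  | [] => 0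
  | i :: rest =>
      if i = 0 ∨ PySem.List.pyGetD lam i 0 < PySem.List.pyGetD lam (i - 1) 0
      then i
      else prevA_find lam rest

def prev_partition (lam : List Int) : Option (List Int) :=
  let k : Int := PySem.List.len lam
  if k ≤ 1 then none
  else
    let idx := prevA_find lam (PySem.List.pyRange (k - 2) (-1) (-1))
    let tail_sum := (PySem.List.slice lam (some (idx + 1)) none).sum - 1
    let mu := PySem.List.slice lam none (some idx)
    some (mu ++ [PySem.List.pyGetD lam idx 0 + 1] ++ PySem.List.pyRepeat [1] tail_sum)

-- ===== PORT B =====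
-- one forward fold over range(1, k-1) with state (idx, pref, run); lam[i] in-bounds, total pyGetD
def prev_partition_alt (lam : List Int) : Option (List Int) :=
  let k : Int := PySem.List.len lam
  if k ≤ 1 then none
  else
    let a0 := PySem.List.pyGetD lam 0 0
    let s := (PySem.List.pyRange 1 (k - 1) 1).foldl
      (fun (st : Int × Int × Int) i =>
        let run := st.2.2 + PySem.List.pyGetD lam i 0
        if PySem.List.pyGetD lam i 0 < PySem.List.pyGetD lam (i - 1) 0
        then (i, run, run)
        else (st.1, st.2.1, run))
      (0, a0, a0)
    let t := s.2.2 + PySem.List.pyGetD lam (-1) 0 - s.2.1 - 1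
    some (PySem.List.slice lam none (some s.1) ++ [PySem.List.pyGetD lam s.1 0 + 1] ++ PySem.List.pyRepeat [1] t)

-- ===== PRECONDITION & SPEC =====
def Spec_prev_partition (lam : List Int) (out : Option (List Int)) : Prop := out = prev_partition_alt lam
instance (lam : List Int) (out : Option (List Int)) : Decidable (Spec_prev_partition lam out) := by unfold Spec_prev_partition; infer_instance

-- ===== CLAIM (what is proved, stated in full; the proofs are below) =====
def Claim_equal_prev_partition : Prop := ∀ (lam : List Int), Dom_prev_partition lam → Spec_prev_partition lam (prev_partition lam)

-- ===== LEMMAS AND PROOFS =====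

-- the common mathematical content: the last strict-descent index among 1..m (0 if none)
def bestIdx (lam : List Int) : Nat → Nat
  | 0 => 0
  | m + 1 => if lam.getD (m + 1) 0 < lam.getD m 0 then m + 1 else bestIdx lam m

lemma bestIdx_le (lam : List Int) (m : Nat) : bestIdx lam m ≤ m := by
  induction m with
  | zero => simp [bestIdx]
  | succ m ih => unfold bestIdx; split_ifs <;> omega

lemma sum_take_succ (lam : List Int) (j : Nat) :
    (lam.take (j + 1)).sum = (lam.take j).sum + lam.getD j 0 := by
  rw [List.take_add_one, List.sum_append]
  cases h : lam[j]? with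
  | none => simp [List.getD, h]
  | some v => simp [List.getD, h]

lemma prevA_find_eq (lam : List Int) (m : Nat) :
    prevA_find lam (PySem.List.pyRange (m : Int) (-1) (-1)) = (bestIdx lam m : Int) := by
  induction m with
  | zero =>
    rw [PySem.List.pyRange_neg_one_cons (by omega)]
    rw [show ((0 : Nat) : Int) - 1 = -1 by norm_num, PySem.List.pyRange_neg_one_eq_nil (by omega)]
    simp [prevA_find, bestIdx]
  | succ m ih =>
    rw [PySem.List.pyRange_neg_one_cons (by omega)]
    simp only [prevA_find]
    rw [show ((m + 1 : Nat) : Int) - 1 = ((m : Nat) : Int) by push_cast; ring]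
    simp only [PySem.List.pyGetD_natCast]
    by_cases h : lam.getD (m + 1) 0 < lam.getD m 0
    · rw [if_pos (Or.inr h)]
      simp only [bestIdx]
      rw [if_pos h]
    · rw [if_neg (fun hc => hc.elim (fun he => by omega) h)]
      rw [show bestIdx lam (m + 1) = bestIdx lam m from by
        simp only [bestIdx]; rw [if_neg h]]
      exact ih

lemma pyGetD_zero_eq_sum_take_one (lam : List Int) :
    PySem.List.pyGetD lam 0 0 = (lam.take 1).sum := by
  rw [PySem.List.pyGetD_zero]
  cases lam <;> simp [List.getD]

lemma foldB_eq (lam : List Int) (m : Nat) :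
    (PySem.List.pyRange 1 ((m : Int) + 1) 1).foldl
      (fun (st : Int × Int × Int) i =>
        let run := st.2.2 + PySem.List.pyGetD lam i 0
        if PySem.List.pyGetD lam i 0 < PySem.List.pyGetD lam (i - 1) 0
        then (i, run, run)
        else (st.1, st.2.1, run))
      (0, PySem.List.pyGetD lam 0 0, PySem.List.pyGetD lam 0 0)
    = ((bestIdx lam m : Int), (lam.take (bestIdx lam m + 1)).sum, (lam.take (m + 1)).sum) := by
  induction m with
  | zero =>
    rw [show ((0 : Nat) : Int) + 1 = 1 by norm_num, PySem.List.pyRange_one_eq_nil (by omega)]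
    simp [bestIdx, pyGetD_zero_eq_sum_take_one]
  | succ m ih =>
    rw [show ((m + 1 : Nat) : Int) + 1 = ((m : Int) + 1) + 1 by push_cast; ring]
    rw [PySem.List.pyRange_one_succ_right (by omega), List.foldl_append, ih]
    simp only [List.foldl_cons, List.foldl_nil]
    rw [show (m : Int) + 1 = ((m + 1 : Nat) : Int) by push_cast; ring]
    rw [show ((m + 1 : Nat) : Int) - 1 = ((m : Nat) : Int) by push_cast; ring]
    simp only [PySem.List.pyGetD_natCast]
    by_cases h : lam.getD (m + 1) 0 < lam.getD m 0
    · rw [if_pos h]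
      simp only [bestIdx]
      rw [if_pos h, sum_take_succ lam (m + 1)]
    · rw [if_neg h]
      simp only [bestIdx]
      rw [if_neg h, sum_take_succ lam (m + 1)]

-- ===== VERDICT (by name: the statement is the Claim_ definition above) =====
theorem prev_partition_spec : Claim_equal_prev_partition := by
  unfold Claim_equal_prev_partition Spec_prev_partition
  intro lam _
  unfold prev_partition prev_partition_alt
  simp only [PySem.List.len_eq]
  by_cases h : (lam.length : Int) <= 1
  · simp [h]
  · rw [if_neg h, if_neg h]
    obtain ⟨m, hm⟩ : ∃ m, lam.length = m + 2 := ⟨lam.length - 2, by omega⟩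
    have hne : lam ≠ [] := by intro e; rw [e] at hm; simp at hm
    rw [hm]
    rw [show ((m + 2 : Nat) : Int) - 2 = (m : Int) by push_cast; ring]
    rw [show ((m + 2 : Nat) : Int) - 1 = (m : Int) + 1 by push_cast; ring]
    rw [prevA_find_eq lam m, foldB_eq lam m]
    set b := bestIdx lam m with hbdef
    have hb : b ≤ m := bestIdx_le lam m
    rw [show (b : Int) + 1 = ((b + 1 : Nat) : Int) by push_cast; ring]
    rw [PySem.List.slice_from_natCast]
    rw [PySem.List.pyGetD_neg_one lam 0 hne]
    have hsplit : (lam.take (b + 1)).sum + (lam.drop (b + 1)).sum = lam.sum := by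
      rw [← List.sum_append, List.take_append_drop]
    have hlast : (lam.take (m + 1)).sum + lam.getLast hne = lam.sum := by
      have hd : lam.dropLast = lam.take (m + 1) := by
        rw [List.dropLast_eq_take, hm]
        norm_num
      have := List.dropLast_append_getLast hne
      calc (lam.take (m + 1)).sum + lam.getLast hne
          = (lam.dropLast ++ [lam.getLast hne]).sum := by rw [List.sum_append, hd]; simp
        _ = lam.sum := by rw [this]
    have htail : (List.drop (b + 1) lam).sum - 1
        = (lam.take (m + 1)).sum + lam.getLast hne - (lam.take (b + 1)).sum - 1 := by omega
    rw [htail]
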